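-- pv_equiv track=rewrite | github.com/anchal00/aoc | 2025/day4_part2.py | get_accessible_rolls
-- ===== SOURCE A (Python) =====
-- positions = [
--     (0, 1),
--     (0, -1),
--     (1, 0),
--     (-1, 0),
--     (-1, -1),
--     (1, -1),
--     (1, 1),
--     (-1, 1),
-- ]
--
-- def is_accessible_roll(row, col, room_map):
--     surrounding_rolls = 0
--     for offset_row, offset_col in positions:
--         new_row = row + offset_row
--         new_col = col + offset_col
--
--         if new_col < 0 or new_col >= len(room_map[0]):
--             continue
--         if new_row < 0 or new_row >= len(room_map):
--             continue
--
--         if room_map[new_row][new_col] == "@":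
--             surrounding_rolls += 1
--         if surrounding_rolls >= 4: return False
--
--     return True
--
-- def get_accessible_rolls(room_map):
--     accessible_rolls = []
--     for i in range(len(room_map)):
--         for j in range(len(room_map[0])):
--             if room_map[i][j] != "@": continue
--             if not is_accessible_roll(i, j, room_map): continue
--             accessible_rolls.append((i,j))
--     return accessible_rolls
-- ===== SOURCE B (Python) =====
-- positions = [
--     (0, 1),
--     (0, -1),
--     (1, 0),
--     (-1, 0),
--     (-1, -1),
--     (1, -1),
--     (1, 1),
--     (-1, 1),
-- ]
--
-- def get_accessible_rolls(room_map):
--     if not room_map: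
--         return []
--     rows, cols = len(room_map), len(room_map[0])
--     counts = {}
--     for r in range(rows):
--         for c in range(cols):
--             if room_map[r][c] != "@":
--                 continue
--             for dr, dc in positions:
--                 nr, nc = r + dr, c + dc
--                 if 0 <= nr < rows and 0 <= nc < cols:
--                     counts[(nr, nc)] = counts.get((nr, nc), 0) + 1
--     return [(i, j) for i in range(rows) for j in range(cols)
--             if room_map[i][j] == "@" and counts.get((i, j), 0) < 4]
-- ===== Notes on version B (the rewrite author's own statement) =====
-- stated objective: alternative
-- what changed: Replaces A's per-cell rescan of the 8 neighbors (with early exit at 4) by a single scatter pass that accumulates each '@' cell's contribution into a neighbor-count dict, followed by a collection pass reading the counts.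
import Mathlib
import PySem

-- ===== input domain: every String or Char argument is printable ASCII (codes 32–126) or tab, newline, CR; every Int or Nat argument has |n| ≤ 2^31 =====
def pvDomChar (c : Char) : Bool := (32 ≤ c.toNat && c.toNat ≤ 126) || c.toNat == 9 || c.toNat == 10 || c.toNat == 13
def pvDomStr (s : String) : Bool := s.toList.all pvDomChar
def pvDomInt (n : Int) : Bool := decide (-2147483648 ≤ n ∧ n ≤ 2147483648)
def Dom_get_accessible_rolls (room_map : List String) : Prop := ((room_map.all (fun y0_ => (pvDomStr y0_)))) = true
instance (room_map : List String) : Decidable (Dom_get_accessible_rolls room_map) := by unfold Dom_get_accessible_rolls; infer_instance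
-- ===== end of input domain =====

-- B replaces A's per-cell rescan of the 8 neighbors (with early exit at 4) by one scatter pass
-- accumulating neighbor counts in a dict, then a collection pass (objective: alternative).

-- ===== PORT A =====
-- module-level constant `positions` (shared by both Pythons)
def pv_positions : List (Int × Int) :=
  [(0, 1), (0, -1), (1, 0), (-1, 0), (-1, -1), (1, -1), (1, 1), (-1, 1)]

-- len(room_map[0]) — exact whenever it is evaluated with room_map nonempty
def pv_cols (room_map : List String) : Int :=
  ((PySem.List.pyGetD room_map 0 "").toList.length : Int)

-- room_map[r][c]; the indices are in range under Pre_ (Python raises IndexError outside)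
def pv_cell (room_map : List String) (r c : Int) : Char :=
  PySem.List.pyGetD (PySem.List.pyGetD room_map r "").toList c '\x00'

def is_accessible_roll (row col : Int) (room_map : List String) : Bool :=
  (pv_positions.foldl
    (fun st off =>
      match st with
      | none => none                             -- already returned False
      | some cnt =>
        let nr := row + off.1
        let nc := col + off.2
        if nc < 0 ∨ pv_cols room_map ≤ nc then some cnt
        else if nr < 0 ∨ (room_map.length : Int) ≤ nr then some cnt
        else
          let cnt' := if pv_cell room_map nr nc = '@' then cnt + 1 else cnt
          if 4 ≤ cnt' then none else some cnt')
    (some (0 : Int))).isSome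

def get_accessible_rolls (room_map : List String) : List (Int × Int) :=
  (PySem.List.pyRange 0 (room_map.length : Int)).foldl
    (fun acc i =>
      (PySem.List.pyRange 0 (pv_cols room_map)).foldl
        (fun acc j =>
          if ¬ (pv_cell room_map i j = '@') then acc
          else if ¬ is_accessible_roll i j room_map then acc
          else acc ++ [(i, j)])
        acc)
    []

-- ===== PORT B =====
def get_accessible_rolls_alt (room_map : List String) : List (Int × Int) :=
  if room_map = [] then []
  else
    let rows : Int := (room_map.length : Int)
    let cols : Int := pv_cols room_map
    let counts : PySem.Dict (Int × Int) Int :=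
      (PySem.List.pyRange 0 rows).foldl
        (fun d r =>
          (PySem.List.pyRange 0 cols).foldl
            (fun d c =>
              if ¬ (pv_cell room_map r c = '@') then d
              else
                pv_positions.foldl
                  (fun d off =>
                    let nr := r + off.1
                    let nc := c + off.2
                    if 0 ≤ nr ∧ nr < rows ∧ 0 ≤ nc ∧ nc < cols then
                      d.insert (nr, nc) (d.getD (nr, nc) 0 + 1)
                    else d)
                  d)
            d)
        PySem.Dict.empty
    (PySem.List.pyRange 0 rows).foldl
      (fun acc i =>
        (PySem.List.pyRange 0 cols).foldl
          (fun acc j =>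
            if pv_cell room_map i j = '@' ∧ counts.getD (i, j) 0 < 4 then acc ++ [(i, j)]
            else acc)
          acc)
      []

-- ===== PRECONDITION & SPEC =====
-- Pre_ excludes exactly the ragged maps with a row shorter than row 0, on which Python A
-- raises IndexError (row 0's length is used as the column bound for every row).
def Pre_get_accessible_rolls (room_map : List String) : Prop :=
  ∀ s ∈ room_map, PySem.Str.len (room_map.headD "") ≤ PySem.Str.len s
instance (room_map : List String) : Decidable (Pre_get_accessible_rolls room_map) := by
  unfold Pre_get_accessible_rolls; infer_instance

def pvWitness_get_accessible_rolls : List String := ["@@@", "@.@", ".@."]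

def Spec_get_accessible_rolls (room_map : List String) (out : List (Int × Int)) : Prop :=
  out = get_accessible_rolls_alt room_map
instance (room_map : List String) (out : List (Int × Int)) :
    Decidable (Spec_get_accessible_rolls room_map out) := by
  unfold Spec_get_accessible_rolls; infer_instance

-- ===== CLAIM (what is proved, stated in full; the proofs are below) =====
def Claim_equal_get_accessible_rolls : Prop :=
  ∀ (room_map : List String), Dom_get_accessible_rolls room_map →
    Pre_get_accessible_rolls room_map →
    Spec_get_accessible_rolls room_map (get_accessible_rolls room_map)

-- ===== LEMMAS AND PROOFS =====

-- number of rows / columns as naturals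
def pvCn (rm : List String) : Nat := (PySem.List.pyGetD rm 0 "").toList.length

-- in-bounds (abbrev so the Decidable instance is found by unfolding)
abbrev pvInbP (rm : List String) (r c : Int) : Prop :=
  0 ≤ r ∧ r < (rm.length : Int) ∧ 0 ≤ c ∧ c < pv_cols rm

-- the canonical neighbor count: gather form
def pvNb (rm : List String) (i j : Int) : Nat :=
  pv_positions.countP (fun o =>
    decide (0 ≤ i + o.1 ∧ i + o.1 < (rm.length : Int) ∧
            0 ≤ j + o.2 ∧ j + o.2 < pv_cols rm ∧
            pv_cell rm (i + o.1) (j + o.2) = '@'))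

-- ----- A side -----

-- the loop body of is_accessible_roll, named
def pvStepA (rm : List String) (row col : Int) : Option Int → Int × Int → Option Int :=
  fun st off =>
    match st with
    | none => none
    | some cnt =>
      let nr := row + off.1
      let nc := col + off.2
      if nc < 0 ∨ pv_cols rm ≤ nc then some cnt
      else if nr < 0 ∨ (rm.length : Int) ≤ nr then some cnt
      else
        let cnt' := if pv_cell rm nr nc = '@' then cnt + 1 else cnt
        if 4 ≤ cnt' then none else some cnt'

-- A's guard-shaped predicate
def pvPredA (rm : List String) (i j : Int) (o : Int × Int) : Bool :=
  !(decide (j + o.2 < 0) || decide (pv_cols rm ≤ j + o.2)) &&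
  (!(decide (i + o.1 < 0) || decide ((rm.length : Int) ≤ i + o.1)) &&
   decide (pv_cell rm (i + o.1) (j + o.2) = '@'))

lemma pvFoldA_none (rm : List String) (row col : Int) :
    ∀ l : List (Int × Int), l.foldl (pvStepA rm row col) none = none := by
  intro l
  induction l with
  | nil => rfl
  | cons a l ih => rw [List.foldl_cons]; exact ih

lemma pvA1 (rm : List String) (row col : Int) :
    ∀ (l : List (Int × Int)) (cnt : Int), 0 ≤ cnt → cnt < 4 →
      (l.foldl (pvStepA rm row col) (some cnt)).isSome
        = decide (cnt + (l.countP (pvPredA rm row col) : Int) < 4) := by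
  intro l
  induction l with
  | nil =>
    intro cnt h0 h4
    simp only [List.foldl_nil, Option.isSome_some, List.countP_nil]
    rw [eq_comm, decide_eq_true_eq]; push_cast; omega
  | cons off l ih =>
    intro cnt h0 h4
    rw [List.foldl_cons]
    by_cases h1 : (col + off.2 < 0 ∨ pv_cols rm ≤ col + off.2)
    · have hstep : pvStepA rm row col (some cnt) off = some cnt := by
        simp [pvStepA, h1]
      have hp : pvPredA rm row col off = false := by
        simp only [pvPredA]
        rcases h1 with h | h <;> simp [h]
      have hcnt : (off :: l).countP (pvPredA rm row col) = l.countP (pvPredA rm row col) := by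
        rw [List.countP_cons, hp]; simp
      rw [hstep, hcnt]
      exact ih cnt h0 h4
    · by_cases h2 : (row + off.1 < 0 ∨ (rm.length : Int) ≤ row + off.1)
      · have hstep : pvStepA rm row col (some cnt) off = some cnt := by
          simp only [pvStepA, if_neg h1]; simp [h2]
        have hp : pvPredA rm row col off = false := by
          simp only [pvPredA]
          rcases h2 with h | h <;> simp [h]
        have hcnt : (off :: l).countP (pvPredA rm row col) = l.countP (pvPredA rm row col) := by
          rw [List.countP_cons, hp]; simp
        rw [hstep, hcnt]
        exact ih cnt h0 h4
      · by_cases hc : pv_cell rm (row + off.1) (col + off.2) = '@'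
        · have hp : pvPredA rm row col off = true := by
            simp only [pvPredA, Bool.and_eq_true, Bool.not_eq_true', Bool.or_eq_false_iff,
              decide_eq_false_iff_not, decide_eq_true_eq]
            refine ⟨⟨?_, ?_⟩, ⟨?_, ?_⟩, hc⟩ <;> omega
          have hcnt : (off :: l).countP (pvPredA rm row col)
              = l.countP (pvPredA rm row col) + 1 := by
            rw [List.countP_cons, hp]; simp
          by_cases hlim : (4 : Int) ≤ cnt + 1
          · have hstep : pvStepA rm row col (some cnt) off = none := by
              simp only [pvStepA, if_neg h1, if_neg h2, if_pos hc, if_pos hlim]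
            rw [hstep, pvFoldA_none, hcnt]
            simp
            omega
          · have hstep : pvStepA rm row col (some cnt) off = some (cnt + 1) := by
              simp only [pvStepA, if_neg h1, if_neg h2, if_pos hc, if_neg hlim]
            rw [hstep, hcnt, ih (cnt + 1) (by omega) (by omega), decide_eq_decide]
            push_cast; omega
        · have hp : pvPredA rm row col off = false := by
            simp [pvPredA, hc]
          have hcnt : (off :: l).countP (pvPredA rm row col) = l.countP (pvPredA rm row col) := by
            rw [List.countP_cons, hp]; simp
          have hstep : pvStepA rm row col (some cnt) off = some cnt := by
            simp only [pvStepA, if_neg h1, if_neg h2, if_neg hc,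
              if_neg (show ¬ (4 : Int) ≤ cnt by omega)]
          rw [hstep, hcnt]
          exact ih cnt h0 h4

lemma pvPredA_eq (rm : List String) (i j : Int) (o : Int × Int) :
    pvPredA rm i j o
      = decide (0 ≤ i + o.1 ∧ i + o.1 < (rm.length : Int) ∧
                0 ≤ j + o.2 ∧ j + o.2 < pv_cols rm ∧
                pv_cell rm (i + o.1) (j + o.2) = '@') := by
  rw [Bool.eq_iff_iff]
  simp only [pvPredA, Bool.and_eq_true, Bool.not_eq_true', Bool.or_eq_false_iff,
    decide_eq_false_iff_not, decide_eq_true_eq, not_lt, not_le]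
  constructor
  · rintro ⟨⟨a1, a2⟩, ⟨b1, b2⟩, hc⟩
    exact ⟨by omega, by omega, by omega, by omega, hc⟩
  · rintro ⟨a1, a2, a3, a4, hc⟩
    exact ⟨⟨by omega, by omega⟩, ⟨by omega, by omega⟩, hc⟩

lemma pvA_iar (rm : List String) (i j : Int) :
    is_accessible_roll i j rm = decide ((pvNb rm i j : Int) < 4) := by
  have h := pvA1 rm i j pv_positions 0 (le_refl 0) (by norm_num)
  have hiar : is_accessible_roll i j rm
      = (pv_positions.foldl (pvStepA rm i j) (some 0)).isSome := rfl
  have hcnt : pv_positions.countP (pvPredA rm i j) = pvNb rm i j := by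
    unfold pvNb
    exact List.countP_congr (fun o _ => by rw [pvPredA_eq])
  rw [hiar, h, hcnt, decide_eq_decide]
  omega

-- collection pass, phrased with the exact neighbor count
def pvCollect (rm : List String) : List (Int × Int) :=
  (PySem.List.pyRange 0 (rm.length : Int)).foldl
    (fun acc i =>
      (PySem.List.pyRange 0 (pv_cols rm)).foldl
        (fun acc j =>
          if pv_cell rm i j = '@' ∧ (pvNb rm i j : Int) < 4 then acc ++ [(i, j)]
          else acc)
        acc)
    []

lemma pvA2 (rm : List String) : get_accessible_rolls rm = pvCollect rm := by
  unfold get_accessible_rolls pvCollect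
  apply PySem.List.foldl_congr_mem
  intro acc i _
  apply PySem.List.foldl_congr_mem
  intro acc' j _
  by_cases hc : pv_cell rm i j = '@'
  · by_cases hn : (pvNb rm i j : Int) < 4
    · simp [hc, hn, pvA_iar]
    · simp [hc, hn, pvA_iar]
  · simp [hc]

-- ----- B side -----

def pvIns (d : PySem.Dict (Int × Int) Int) (t : Int × Int) : PySem.Dict (Int × Int) Int :=
  d.insert t (d.getD t 0 + 1)

lemma pv_foldl_ite {α β γ : Type} (p : α → Prop) [DecidablePred p] (g : α → γ)
    (f : β → γ → β) :
    ∀ (l : List α) (d : β),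
      l.foldl (fun d x => if p x then f d (g x) else d) d
        = ((l.filter (fun x => decide (p x))).map g).foldl f d := by
  intro l
  induction l with
  | nil => intro d; rfl
  | cons a l ih =>
    intro d
    by_cases h : p a
    · simp only [List.foldl_cons, List.filter_cons,
        decide_eq_true_eq, if_pos h, List.map_cons]
      exact ih (f d (g a))
    · simp only [List.foldl_cons, List.filter_cons,
        decide_eq_true_eq, if_neg h]
      exact ih d

def pvTargets (rm : List String) (r c : Int) : List (Int × Int) :=
  (pv_positions.filter (fun o =>
      decide (0 ≤ r + o.1 ∧ r + o.1 < (rm.length : Int) ∧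
              0 ≤ c + o.2 ∧ c + o.2 < pv_cols rm))).map
    (fun o => (r + o.1, c + o.2))

def pvEv (rm : List String) (r c : Int) : List (Int × Int) :=
  if pv_cell rm r c = '@' then pvTargets rm r c else []

def pvEvents (rm : List String) : List (Int × Int) :=
  (PySem.List.pyRange 0 (rm.length : Int)).flatMap (fun r =>
    (PySem.List.pyRange 0 (pv_cols rm)).flatMap (fun c => pvEv rm r c))

-- the scatter loop of B, named
def pvCounts (rm : List String) : PySem.Dict (Int × Int) Int :=
  (PySem.List.pyRange 0 (rm.length : Int)).foldl
    (fun d r =>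
      (PySem.List.pyRange 0 (pv_cols rm)).foldl
        (fun d c =>
          if ¬ (pv_cell rm r c = '@') then d
          else
            pv_positions.foldl
              (fun d off =>
                let nr := r + off.1
                let nc := c + off.2
                if 0 ≤ nr ∧ nr < (rm.length : Int) ∧ 0 ≤ nc ∧ nc < pv_cols rm then
                  d.insert (nr, nc) (d.getD (nr, nc) 0 + 1)
                else d)
              d)
        d)
    PySem.Dict.empty

lemma pvCounts_eq (rm : List String) :
    pvCounts rm = (pvEvents rm).foldl pvIns PySem.Dict.empty := by
  unfold pvCounts pvEvents
  rw [List.foldl_flatMap]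
  apply PySem.List.foldl_congr_mem
  intro d r _
  rw [List.foldl_flatMap]
  apply PySem.List.foldl_congr_mem
  intro d' c _
  by_cases hc : pv_cell rm r c = '@'
  · rw [if_neg (by simpa using hc)]
    unfold pvEv pvTargets
    rw [if_pos hc]
    exact pv_foldl_ite
      (fun o => 0 ≤ r + o.1 ∧ r + o.1 < (rm.length : Int) ∧
                0 ≤ c + o.2 ∧ c + o.2 < pv_cols rm)
      (fun o => (r + o.1, c + o.2)) pvIns pv_positions d'
  · rw [if_pos (by simpa using hc)]
    unfold pvEv
    rw [if_neg hc]
    rfl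

lemma pvCounts_getD (rm : List String) (k : Int × Int) :
    (pvCounts rm).getD k 0 = ((pvEvents rm).count k : Int) := by
  rw [pvCounts_eq]
  have h := PySem.Dict.getD_foldl_insert_add_one (pvEvents rm) PySem.Dict.empty k
  have hh : (pvEvents rm).foldl pvIns PySem.Dict.empty
      = (pvEvents rm).foldl (fun d x => d.insert x (d.getD x 0 + 1)) PySem.Dict.empty := rfl
  rw [hh, h, PySem.Dict.getD_empty, zero_add]

lemma pv_sum_map_range (n : Nat) (f : Nat → Nat) :
    ((List.range n).map f).sum = ∑ x ∈ Finset.range n, f x := by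
  induction n with
  | zero => simp
  | succ n ih =>
    rw [List.range_succ, List.map_append, List.sum_append, Finset.sum_range_succ, ih]
    simp

lemma pv_point_sum (Rn Cn : Nat) (a b : Int) (Q : Int → Int → Prop)
    [inst : ∀ x y, Decidable (Q x y)] :
    (∑ r ∈ Finset.range Rn, ∑ c ∈ Finset.range Cn,
        if ((r : Int) = a ∧ (c : Int) = b ∧ Q r c) then 1 else 0)
      = if (0 ≤ a ∧ a < (Rn : Int) ∧ 0 ≤ b ∧ b < (Cn : Int) ∧ Q a b) then (1 : Nat) else 0 := by
  by_cases ha : 0 ≤ a ∧ a < (Rn : Int)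
  · by_cases hb : 0 ≤ b ∧ b < (Cn : Int)
    · have har : ((a.toNat : Int)) = a := Int.toNat_of_nonneg ha.1
      have hbr : ((b.toNat : Int)) = b := Int.toNat_of_nonneg hb.1
      rw [Finset.sum_eq_single a.toNat]
      · rw [Finset.sum_eq_single b.toNat]
        · rw [har, hbr]
          by_cases hq : Q a b
          · rw [if_pos ⟨rfl, rfl, hq⟩, if_pos ⟨ha.1, ha.2, hb.1, hb.2, hq⟩]
          · rw [if_neg (by rintro ⟨-, -, h⟩; exact hq h),
              if_neg (by rintro ⟨-, -, -, -, h⟩; exact hq h)]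
        · intro c _ hne
          rw [if_neg]
          rintro ⟨-, h2, -⟩
          exact hne (by omega)
        · intro habs
          exact absurd (Finset.mem_range.mpr (by omega)) habs
      · intro r _ hne
        apply Finset.sum_eq_zero
        intro c _
        rw [if_neg]
        rintro ⟨h1, -, -⟩
        exact hne (by omega)
      · intro habs
        exact absurd (Finset.mem_range.mpr (by omega)) habs
    · rw [if_neg (by rintro ⟨-, -, h3, h4, -⟩; exact hb ⟨h3, h4⟩)]
      apply Finset.sum_eq_zero; intro r _
      apply Finset.sum_eq_zero; intro c hc
      rw [if_neg]
      rintro ⟨-, h2, -⟩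
      have := Finset.mem_range.mp hc
      exact hb ⟨by omega, by omega⟩
  · rw [if_neg (by rintro ⟨h1, h2, -⟩; exact ha ⟨h1, h2⟩)]
    apply Finset.sum_eq_zero; intro r hr
    apply Finset.sum_eq_zero; intro c _
    rw [if_neg]
    rintro ⟨h1, -, -⟩
    have := Finset.mem_range.mp hr
    exact ha ⟨by omega, by omega⟩

-- one scatter term, summed over all cells
lemma pv_term_sum (rm : List String) (i j dr dc : Int) (h : pvInbP rm i j) :
    (∑ r ∈ Finset.range rm.length, ∑ c ∈ Finset.range (pvCn rm),
        if (pv_cell rm r c = '@' ∧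
            (((r : Int) + dr = i ∧ (c : Int) + dc = j) ∧
             (0 ≤ (r : Int) + dr ∧ (r : Int) + dr < (rm.length : Int) ∧
              0 ≤ (c : Int) + dc ∧ (c : Int) + dc < ((pvCn rm : Nat) : Int)))) then 1 else 0)
      = if (0 ≤ i - dr ∧ i - dr < (rm.length : Int) ∧
            0 ≤ j - dc ∧ j - dc < ((pvCn rm : Nat) : Int) ∧
            pv_cell rm (i - dr) (j - dc) = '@') then (1 : Nat) else 0 := by
  have key := pv_point_sum rm.length (pvCn rm) (i - dr) (j - dc)
      (fun x y => pv_cell rm x y = '@' ∧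
        (0 ≤ x + dr ∧ x + dr < (rm.length : Int) ∧
         0 ≤ y + dc ∧ y + dc < ((pvCn rm : Nat) : Int)))
  have step1 : (∑ r ∈ Finset.range rm.length, ∑ c ∈ Finset.range (pvCn rm),
        if (pv_cell rm r c = '@' ∧
            (((r : Int) + dr = i ∧ (c : Int) + dc = j) ∧
             (0 ≤ (r : Int) + dr ∧ (r : Int) + dr < (rm.length : Int) ∧
              0 ≤ (c : Int) + dc ∧ (c : Int) + dc < ((pvCn rm : Nat) : Int)))) then 1 else 0)
      = (∑ r ∈ Finset.range rm.length, ∑ c ∈ Finset.range (pvCn rm),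
        if ((r : Int) = i - dr ∧ (c : Int) = j - dc ∧
            (pv_cell rm r c = '@' ∧
             (0 ≤ (r : Int) + dr ∧ (r : Int) + dr < (rm.length : Int) ∧
              0 ≤ (c : Int) + dc ∧ (c : Int) + dc < ((pvCn rm : Nat) : Int)))) then 1 else 0) := by
    apply Finset.sum_congr rfl
    intro r _
    apply Finset.sum_congr rfl
    intro c _
    apply if_congr _ rfl rfl
    constructor
    · rintro ⟨hcell, ⟨e1, e2⟩, hb⟩
      exact ⟨by omega, by omega, hcell, hb⟩
    · rintro ⟨e1, e2, hcell, hb⟩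
      exact ⟨hcell, ⟨by omega, by omega⟩, hb⟩
  rw [step1, key]
  have h4' : j < ((pvCn rm : Nat) : Int) := h.2.2.2
  have h1' : 0 ≤ i := h.1
  have h2' : i < (rm.length : Int) := h.2.1
  have h3' : 0 ≤ j := h.2.2.1
  apply if_congr _ rfl rfl
  constructor
  · rintro ⟨g1, g2, g3, g4, gc, -⟩
    exact ⟨g1, g2, g3, g4, gc⟩
  · rintro ⟨g1, g2, g3, g4, gc⟩
    refine ⟨g1, g2, g3, g4, gc, ?_, ?_, ?_, ?_⟩ <;> omega

-- the events list counts exactly the '@' neighbors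
lemma pvB3 (rm : List String) (i j : Int) (h : pvInbP rm i j) :
    (pvEvents rm).count (i, j) = pvNb rm i j := by
  have hC : pv_cols rm = ((pvCn rm : Nat) : Int) := rfl
  have hev : ∀ (r c : Int), (pvEv rm r c).count (i, j)
      = pv_positions.countP (fun o => decide (pv_cell rm r c = '@') &&
          (((r + o.1, c + o.2) == ((i, j) : Int × Int)) &&
           decide (0 ≤ r + o.1 ∧ r + o.1 < (rm.length : Int) ∧
                   0 ≤ c + o.2 ∧ c + o.2 < ((pvCn rm : Nat) : Int)))) := by
    intro r c
    have hcount : ∀ (l : List (Int × Int)),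
        l.count (i, j) = l.countP (fun x => x == ((i, j) : Int × Int)) := fun _ => rfl
    unfold pvEv pvTargets
    rw [← hC]
    by_cases hc : pv_cell rm r c = '@'
    · rw [if_pos hc, hcount, List.countP_map, List.countP_filter]
      apply List.countP_congr
      intro o _
      simp [hc]
    · rw [if_neg hc]
      have : (fun o : Int × Int => decide (pv_cell rm r c = '@') &&
          (((r + o.1, c + o.2) == ((i, j) : Int × Int)) &&
           decide (0 ≤ r + o.1 ∧ r + o.1 < (rm.length : Int) ∧
                   0 ≤ c + o.2 ∧ c + o.2 < pv_cols rm))) = fun _ => false := by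
        funext o; simp [hc]
      rw [List.count_nil, this]
      simp
  unfold pvEvents pvNb
  rw [hC]
  simp only [List.count_flatMap, PySem.List.pyRange_zero_natCast, List.map_map,
    Function.comp_def, pv_sum_map_range]
  simp only [hev]
  simp only [pv_positions, List.countP_cons, List.countP_nil]
  simp only [Bool.and_eq_true, beq_iff_eq, Prod.mk.injEq, decide_eq_true_eq]
  simp only [Finset.sum_add_distrib, zero_add]
  rw [pv_term_sum rm i j 0 1 h, pv_term_sum rm i j 0 (-1) h, pv_term_sum rm i j 1 0 h,
    pv_term_sum rm i j (-1) 0 h, pv_term_sum rm i j (-1) (-1) h, pv_term_sum rm i j 1 (-1) h,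
    pv_term_sum rm i j 1 1 h, pv_term_sum rm i j (-1) 1 h]
  norm_num
  have hneg : ∀ x : Int, x + -1 = x - 1 := fun x => by ring
  simp only [hneg]
  ac_rfl

-- the two collection passes agree
lemma pvColl_eq (rm : List String) :
    pvCollect rm
      = (PySem.List.pyRange 0 (rm.length : Int)).foldl
          (fun acc i =>
            (PySem.List.pyRange 0 (pv_cols rm)).foldl
              (fun acc j =>
                if pv_cell rm i j = '@' ∧ (pvCounts rm).getD (i, j) 0 < 4 then acc ++ [(i, j)]
                else acc)
              acc)
          [] := by
  unfold pvCollect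
  apply PySem.List.foldl_congr_mem
  intro acc i hi
  apply PySem.List.foldl_congr_mem
  intro acc' j hj
  have hib : pvInbP rm i j := by
    have h1 := PySem.List.mem_pyRange_one.mp hi
    have h2 := PySem.List.mem_pyRange_one.mp hj
    exact ⟨h1.1, h1.2, h2.1, h2.2⟩
  have hc : (pvCounts rm).getD (i, j) 0 = ((pvNb rm i j : Nat) : Int) := by
    rw [pvCounts_getD, pvB3 rm i j hib]
  rw [hc]

-- ===== VERDICT (by name: the statement is the Claim_ definition above) =====
theorem get_accessible_rolls_spec : Claim_equal_get_accessible_rolls := by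
  intro rm _ _
  unfold Spec_get_accessible_rolls
  rw [pvA2]
  by_cases hrm : rm = []
  · subst hrm
    rfl
  · unfold get_accessible_rolls_alt
    rw [if_neg hrm]
    exact pvColl_eq rm
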